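-- pv_equiv track=rewrite | github.com/exo-explore/exo | src/exo/worker/engines/image/pipeline/runner.py | calculate_token_indices
-- ===== SOURCE A (Python) =====
-- def calculate_token_indices(patch_heights: list[int], latent_width: int):
--     tokens_per_row = latent_width
--
--     token_ranges = []
--     cumulative_height = 0
--
--     for h in patch_heights:
--         start_token = tokens_per_row * cumulative_height
--         end_token = tokens_per_row * (cumulative_height + h)
--
--         token_ranges.append((start_token, end_token))
--         cumulative_height += h
--
--     return token_ranges
-- ===== SOURCE B (Python) =====
-- def calculate_token_indices(patch_heights: list[int], latent_width: int):
--     # Pass 1: cumulative boundary table (n+1 entries, starting at 0).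
--     bounds = [0]
--     for h in patch_heights:
--         bounds.append(bounds[-1] + h)
--     # Pass 2: pair adjacent boundaries, scaled by the row width.
--     return [(latent_width * a, latent_width * b) for a, b in zip(bounds[:-1], bounds[1:])]
-- ===== Notes on version B (the rewrite author's own statement) =====
-- stated objective: idiomatic
-- what changed: Replaces the single accumulating loop that multiplies and appends as it goes with a two-pass decomposition: first a cumulative boundary table, then a pairwise zip of adjacent boundaries scaled by latent_width.
import Mathlib
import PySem

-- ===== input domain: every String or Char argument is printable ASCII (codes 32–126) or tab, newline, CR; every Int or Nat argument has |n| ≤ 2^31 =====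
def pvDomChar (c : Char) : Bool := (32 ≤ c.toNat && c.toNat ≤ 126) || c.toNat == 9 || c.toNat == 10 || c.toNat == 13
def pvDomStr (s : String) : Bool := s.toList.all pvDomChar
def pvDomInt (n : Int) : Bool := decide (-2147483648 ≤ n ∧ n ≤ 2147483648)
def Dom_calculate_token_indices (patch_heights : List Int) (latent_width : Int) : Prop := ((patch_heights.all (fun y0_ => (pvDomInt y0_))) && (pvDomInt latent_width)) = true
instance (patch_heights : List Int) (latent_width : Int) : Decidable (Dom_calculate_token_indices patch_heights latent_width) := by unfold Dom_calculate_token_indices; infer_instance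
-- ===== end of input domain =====

-- B replaces A's single accumulating multiply-and-append loop by a cumulative
-- boundary table followed by a pairwise zip of adjacent boundaries (idiomatic decomposition).

-- ===== PORT A =====
-- the loop: accumulator cumulative_height, appending (w*c, w*(c+h)) each step
def ctiLoopA (w : Int) : List Int → Int → List (Int × Int)
  | [], _ => []
  | h :: t, c => (w * c, w * (c + h)) :: ctiLoopA w t (c + h)

def calculate_token_indices (patch_heights : List Int) (latent_width : Int) : List (Int × Int) :=
  ctiLoopA latent_width patch_heights 0

-- ===== PORT B =====
-- pass 1: the boundary table (bounds.append(bounds[-1] + h), started at [0])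
def ctiBounds : Int → List Int → List Int
  | c, [] => [c]
  | c, h :: t => c :: ctiBounds (c + h) t

def calculate_token_indices_alt (patch_heights : List Int) (latent_width : Int) : List (Int × Int) :=
  let bounds := ctiBounds 0 patch_heights
  -- pass 2: [(w*a, w*b) for a, b in zip(bounds[:-1], bounds[1:])]
  (List.zip bounds.dropLast bounds.tail).map (fun ab => (latent_width * ab.1, latent_width * ab.2))

-- ===== PRECONDITION & SPEC =====
def Spec_calculate_token_indices (patch_heights : List Int) (latent_width : Int) (out : List (Int × Int)) : Prop := out = calculate_token_indices_alt patch_heights latent_width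
instance (patch_heights : List Int) (latent_width : Int) (out : List (Int × Int)) : Decidable (Spec_calculate_token_indices patch_heights latent_width out) := by unfold Spec_calculate_token_indices; infer_instance

-- ===== CLAIM (what is proved, stated in full; the proofs are below) =====
def Claim_equal_calculate_token_indices : Prop := ∀ (patch_heights : List Int) (latent_width : Int), Dom_calculate_token_indices patch_heights latent_width → Spec_calculate_token_indices patch_heights latent_width (calculate_token_indices patch_heights latent_width)

-- ===== LEMMAS AND PROOFS =====
theorem ctiBounds_ne_nil (c : Int) (l : List Int) : ctiBounds c l ≠ [] := by
  cases l <;> simp [ctiBounds]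

theorem cti_key (w : Int) (l : List Int) : ∀ c : Int,
    ctiLoopA w l c =
      (List.zip (ctiBounds c l).dropLast (ctiBounds c l).tail).map
        (fun ab => (w * ab.1, w * ab.2)) := by
  induction l with
  | nil => intro c; simp [ctiLoopA, ctiBounds]
  | cons h t ih =>
    intro c
    have hne := ctiBounds_ne_nil (c + h) t
    cases ht : ctiBounds (c + h) t with
    | nil => exact absurd ht hne
    | cons b bs =>
      have hb : b = c + h := by
        cases t <;> simp [ctiBounds] at ht <;> omega
      simp [ctiLoopA, ctiBounds, ht, ih (c + h), hb]

-- ===== VERDICT (by name: the statement is the Claim_ definition above) =====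
theorem calculate_token_indices_spec : Claim_equal_calculate_token_indices := by
  intro ph w _
  unfold Spec_calculate_token_indices calculate_token_indices calculate_token_indices_alt
  exact cti_key w ph 0
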